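-- pv_equiv track=rewrite | github.com/computationalprivacy/querysnout | src/helpers/nice.py | isolate_neq_queries
-- ===== SOURCE A (Python) =====
-- def isolate_neq_queries(solution):
--     """
--     (internal) Isolate all pairs of queries that are part of a Noise-Exploitation Attack.
--     This returns:
--         1. List of non-neq queries.
--         2. List of pairs of neq queries and the indices of the flipped entries in other queries.
--            (formally, L = [(neq_i, (i1, i2, ...)), ...])
--     """
--     n_queries = len(solution)
--     non_neq_queries = list(solution)
--     neq_pairs = []
--     # Iterate over queries to find "leading" queries (q in the pair (q,q')).
--     for i, query1 in enumerate(solution):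
--         # Leading queries have no -1 in quasi-identifiers, and condition on the sensitive attribute.
--         if any(cond == -1 for cond in query1[:-1]) or query1[-1] == 0:
--             continue
--         # This is a leading query! Find all queries that differ only by one condition, replacing a
--         #  0 (no condition) by a -1 (difference condition).
--         pairs_for_this_query = []
--         for query2 in solution[:i] + solution[i + 1 :]:  # skip query1
--             diverging_index = None
--             compatible = True
--             for idx, (x, y) in enumerate(zip(query1, query2)):
--                 # This is the only acceptable difference.
--                 if x == 0 and y == -1:
--                     # There are > 1 differences! Not acceptable.
--                     if diverging_index is not None:
--                         compatible = False
--                         break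
--                     # Otherwise, this is the index where things change.
--                     diverging_index = idx
--                 # Any other difference is not ok.
--                 elif x != y:
--                     compatible = False
--                     break
--             if compatible:
--                 pairs_for_this_query.append((query2, diverging_index))
--                 # Remove the corresponding queries from non_neq_queries.
--                 if query1 in non_neq_queries:
--                     non_neq_queries.remove(query1)
--                 if query2 in non_neq_queries:
--                     non_neq_queries.remove(query2)
--         # We have now found all pairs for this query.
--         if pairs_for_this_query:
--             neq_pairs.append((query1, pairs_for_this_query))
--     return non_neq_queries, neq_pairs
-- ===== SOURCE B (Python) =====
-- def isolate_neq_queries(solution):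
--     """Two-phase re-implementation: first collect all neq pairs (diff positions
--     computed as a list instead of a stateful scan), counting removal events per
--     query value; then build non_neq_queries in one pass, keeping only the
--     occurrences of each value beyond its event count."""
--     def flip_index(q1, q2):
--         # (ok, k): k is the single 0->-1 flip position, or None if the
--         # zipped prefixes are identical.
--         it = (k for k, (x, y) in enumerate(zip(q1, q2)) if x != y)
--         k = next(it, None)
--         if k is None:
--             return True, None
--         if q1[k] == 0 and q2[k] == -1 and next(it, None) is None:
--             return True, k
--         return False, None
--
--     neq_pairs = []
--     events = {}
--     for i, q1 in enumerate(solution):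
--         if q1[-1] == 0 or any(c == -1 for c in q1[:-1]):
--             continue
--         matches = []
--         for j, q2 in enumerate(solution):
--             if j == i:
--                 continue
--             ok, k = flip_index(q1, q2)
--             if ok:
--                 matches.append((q2, k))
--         if matches:
--             neq_pairs.append((q1, matches))
--             t1 = tuple(q1)
--             events[t1] = events.get(t1, 0) + len(matches)
--             for q2, _ in matches:
--                 t2 = tuple(q2)
--                 events[t2] = events.get(t2, 0) + 1
--     seen = {}
--     non_neq = []
--     for q in solution:
--         t = tuple(q)
--         seen[t] = seen.get(t, 0) + 1
--         if seen[t] > events.get(t, 0):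
--             non_neq.append(q)
--     return non_neq, neq_pairs
-- ===== Notes on version B (the rewrite author's own statement) =====
-- stated objective: alternative
-- what changed: B replaces A's interleaved guarded list.remove bookkeeping and stateful break-scan by a two-phase algorithm: phase one finds each leading query's matches with a diff-position-list helper and accumulates per-value removal-event counts in a dict, phase two builds non_neq_queries in a single pass keeping only occurrences beyond each value's event count.
-- outside the precondition, e.g. on isolate_neq_queries([[], [0, 1]]): A raises IndexError, B raises IndexError
import Mathlib
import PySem

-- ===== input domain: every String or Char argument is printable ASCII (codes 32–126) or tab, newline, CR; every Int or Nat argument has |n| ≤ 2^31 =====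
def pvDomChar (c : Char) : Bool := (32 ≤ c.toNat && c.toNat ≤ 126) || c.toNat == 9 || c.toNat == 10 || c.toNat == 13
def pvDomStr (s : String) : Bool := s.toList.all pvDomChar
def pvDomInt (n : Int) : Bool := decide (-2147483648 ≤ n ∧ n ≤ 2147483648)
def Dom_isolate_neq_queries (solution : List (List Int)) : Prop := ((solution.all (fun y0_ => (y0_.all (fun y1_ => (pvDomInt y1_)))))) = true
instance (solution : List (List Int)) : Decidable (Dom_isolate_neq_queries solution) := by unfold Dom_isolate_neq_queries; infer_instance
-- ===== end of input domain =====

-- B replaces A's interleaved list.remove bookkeeping and stateful pair scan by a two-phase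
-- algorithm (diff-position lists + an event counter, then one survivor pass); equal output, similar cost.

-- ===== PORT A =====
-- the inner `for idx, (x, y) in enumerate(zip(query1, query2))` loop with its
-- (diverging_index, compatible) state and `break`s
def pvScanA : List (Int × Int) → Int → Option Int → Option Int × Bool
  | [], _, div => (div, true)
  | (x, y) :: rest, idx, div =>
    if x = 0 ∧ y = -1 then
      match div with
      | some d => (some d, false)
      | none => pvScanA rest (idx + 1) (some idx)
    else if x ≠ y then (div, false)
    else pvScanA rest (idx + 1) div

-- the `for query2 in solution[:i] + solution[i+1:]` loop: state (pairs_for_this_query, non_neq_queries)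
def pvInnerA (q1 : List Int) (st : List (List Int × Option Int) × List (List Int))
    (others : List (List Int)) : List (List Int × Option Int) × List (List Int) :=
  others.foldl
    (fun st q2 =>
      let r := pvScanA (q1.zip q2) 0 none
      if r.2 then
        (st.1 ++ [(q2, r.1)],
         let nn := if q1 ∈ st.2 then (PySem.List.remove? st.2 q1).getD st.2 else st.2
         if q2 ∈ nn then (PySem.List.remove? nn q2).getD nn else nn)
      else st)
    st

def isolate_neq_queries (solution : List (List Int)) :
    List (List Int) × (List (List Int × (List (List Int × Option Int)))) :=
  (PySem.List.enumerate solution 0).foldl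
    (fun (st : List (List Int) × List (List Int × List (List Int × Option Int))) iq =>
      let i := iq.1
      let q1 := iq.2
      if (PySem.List.slice q1 none (some (-1))).any (fun c => c == -1)
           ∨ PySem.List.pyGetD q1 (-1) 0 = 0 then st
      else
        let others := PySem.List.slice solution none (some i) ++ PySem.List.slice solution (some (i + 1)) none
        let p := pvInnerA q1 ([], st.1) others
        (p.2, if p.1 ≠ [] then st.2 ++ [(q1, p.1)] else st.2))
    (solution, [])

-- ===== PORT B =====
-- `flip_index`'s lazy diff generator: first diff position (with the unscanned rest), or none
def pvFirstDiff : List (Int × Int) → Int → Option (Int × List (Int × Int) × Int)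
  | [], _ => none
  | (x, y) :: rest, i => if x ≠ y then some (i, rest, i + 1) else pvFirstDiff rest (i + 1)

-- `flip_index`: first diff, flip check, then no-second-diff check
def pvFlipIndexB (q1 q2 : List Int) : Bool × Option Int :=
  match pvFirstDiff (q1.zip q2) 0 with
  | none => (true, none)
  | some (k, rest, i) =>
    if PySem.List.pyGetD q1 k 0 = 0 ∧ PySem.List.pyGetD q2 k 0 = -1 ∧ pvFirstDiff rest i = none then
      (true, some k)
    else (false, none)

def isolate_neq_queries_alt (solution : List (List Int)) :
    List (List Int) × (List (List Int × (List (List Int × Option Int)))) :=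
  let r :=
    (PySem.List.enumerate solution 0).foldl
      (fun (st : List (List Int × List (List Int × Option Int)) × PySem.Dict (List Int) Int) iq =>
        let i := iq.1
        let q1 := iq.2
        if PySem.List.pyGetD q1 (-1) 0 = 0
             ∨ (PySem.List.slice q1 none (some (-1))).any (fun c => c == -1) then st
        else
          let mts :=
            (PySem.List.enumerate solution 0).foldl
              (fun acc jq =>
                if jq.1 = i then acc
                else
                  let f := pvFlipIndexB q1 jq.2
                  if f.1 then acc ++ [(jq.2, f.2)] else acc)
              []
          if mts = [] then st
          else
            let ev1 := st.2.modify q1 0 (· + (mts.length : Int))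
            let ev2 := mts.foldl (fun d m => d.modify m.1 0 (· + 1)) ev1
            (st.1 ++ [(q1, mts)], ev2))
      ([], PySem.Dict.empty)
  let fin :=
    solution.foldl
      (fun (st : PySem.Dict (List Int) Int × List (List Int)) q =>
        let seen := st.1.modify q 0 (· + 1)
        (seen, if seen.getD q 0 > r.2.getD q 0 then st.2 ++ [q] else st.2))
      (PySem.Dict.empty, [])
  (fin.2, r.1)

-- ===== PRECONDITION & SPEC =====
-- Pre_ excludes exactly the inputs where Python A raises: an empty inner query makes
-- `query1[-1]` raise IndexError (B raises there too).
def Pre_isolate_neq_queries (solution : List (List Int)) : Prop := ∀ q ∈ solution, q ≠ []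
instance (solution : List (List Int)) : Decidable (Pre_isolate_neq_queries solution) := by
  unfold Pre_isolate_neq_queries; infer_instance

def pvWitness_isolate_neq_queries : List (List Int) := [[0, 1], [-1, 1], [0, 0]]

def Spec_isolate_neq_queries (solution : List (List Int)) (out : List (List Int) × (List (List Int × (List (List Int × Option Int))))) : Prop := out = isolate_neq_queries_alt solution
instance (solution : List (List Int)) (out : List (List Int) × (List (List Int × (List (List Int × Option Int))))) : Decidable (Spec_isolate_neq_queries solution out) := by unfold Spec_isolate_neq_queries; infer_instance

-- ===== CLAIM (what is proved, stated in full; the proofs are below) =====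
def Claim_equal_isolate_neq_queries : Prop := ∀ (solution : List (List Int)), Dom_isolate_neq_queries solution → Pre_isolate_neq_queries solution → Spec_isolate_neq_queries solution (isolate_neq_queries solution)

-- ===== LEMMAS AND PROOFS =====

def pvDiffs (l : List (Int × Int)) (s : Int) : List (Int × (Int × Int)) :=
  (PySem.List.enumerate l s).filter (fun p => p.2.1 != p.2.2)

lemma pvScanA_some (l : List (Int × Int)) (s : Int) (k : Int) :
    pvScanA l s (some k) = (some k, l.all (fun p => p.1 == p.2)) := by
  induction l generalizing s with
  | nil => rfl
  | cons p rest ih =>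
    obtain ⟨x, y⟩ := p
    simp only [pvScanA, List.all_cons]
    split_ifs with h1 h2
    · obtain ⟨hx, hy⟩ := h1; subst hx; subst hy; simp
    · simp [h2]
    · push_neg at h2
      subst h2
      simp [ih]

lemma pvDiffs_eq_nil_iff (l : List (Int × Int)) (s : Int) :
    pvDiffs l s = [] ↔ l.all (fun p => p.1 == p.2) := by
  induction l generalizing s with
  | nil => simp [pvDiffs]
  | cons p rest ih =>
    obtain ⟨x, y⟩ := p
    simp only [pvDiffs, PySem.List.enumerate_cons, List.filter_cons, List.all_cons] at *
    by_cases h : x = y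
    · subst h; simpa using ih (s + 1)
    · simp [h, bne_iff_ne]

lemma pvScanA_none (l : List (Int × Int)) (s : Int) :
    pvScanA l s none =
      match pvDiffs l s with
      | [] => (none, true)
      | (k, x, y) :: rest => if x = 0 ∧ y = -1 then (some k, decide (rest = [])) else (none, false) := by
  induction l generalizing s with
  | nil => rfl
  | cons p rest ih =>
    obtain ⟨x, y⟩ := p
    simp only [pvScanA]
    by_cases h1 : x = 0 ∧ y = -1
    · obtain ⟨hx, hy⟩ := h1; subst hx; subst hy
      rw [if_pos ⟨rfl, rfl⟩, pvScanA_some]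
      have hd : pvDiffs ((0, -1) :: rest) s = (s, 0, -1) :: pvDiffs rest (s + 1) := by
        simp [pvDiffs, PySem.List.enumerate_cons, List.filter_cons]
      rw [hd]
      have hb := pvDiffs_eq_nil_iff rest (s + 1)
      by_cases hh : pvDiffs rest (s + 1) = []
      · simp [hh, hb.mp hh]
      · have hf : rest.all (fun p => p.1 == p.2) = false :=
          Bool.eq_false_iff.mpr (fun h => hh (hb.mpr h))
        simp [hh, hf]
    · by_cases h2 : x = y
      · subst h2
        rw [if_neg h1, if_neg (by simp)]
        have hd : pvDiffs ((x, x) :: rest) s = pvDiffs rest (s + 1) := by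
          simp [pvDiffs, PySem.List.enumerate_cons, List.filter_cons]
        rw [hd, ih]
      · rw [if_neg h1, if_pos h2]
        have hd : pvDiffs ((x, y) :: rest) s = (s, x, y) :: pvDiffs rest (s + 1) := by
          simp [pvDiffs, PySem.List.enumerate_cons, List.filter_cons, bne_iff_ne, h2]
        rw [hd]
        simp [h1]

lemma pvDiffs_mem (q1 q2 : List Int) (k x y : Int) (h : (k, x, y) ∈ pvDiffs (q1.zip q2) 0) :
    PySem.List.pyGetD q1 k 0 = x ∧ PySem.List.pyGetD q2 k 0 = y := by
  have h2 := List.mem_of_mem_filter h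
  rw [PySem.List.mem_enumerate_iff] at h2
  obtain ⟨j, hj, hp⟩ := h2
  rw [List.getElem_zip] at hp
  have hk : k = (j : Int) := by
    have := congrArg Prod.fst hp; simpa using this
  have hx : x = q1[j]'(by simp at hj; omega) := by
    have := congrArg (fun p => p.2.1) hp; simpa using this
  have hy : y = q2[j]'(by simp at hj; omega) := by
    have := congrArg (fun p => p.2.2) hp; simpa using this
  subst hk
  constructor
  · rw [PySem.List.pyGetD_natCast, hx, List.getD_eq_getElem]
  · rw [PySem.List.pyGetD_natCast, hy, List.getD_eq_getElem]

lemma pvFirstDiff_none_iff (l : List (Int × Int)) (s : Int) :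
    pvFirstDiff l s = none ↔ pvDiffs l s = [] := by
  induction l generalizing s with
  | nil => simp [pvFirstDiff, pvDiffs]
  | cons p rest ih =>
    obtain ⟨x, y⟩ := p
    simp only [pvFirstDiff]
    by_cases h : x = y
    · subst h
      rw [if_neg (by simp)]
      rw [show pvDiffs ((x, x) :: rest) s = pvDiffs rest (s + 1) by
            simp [pvDiffs, PySem.List.enumerate_cons]]
      exact ih (s + 1)
    · rw [if_pos h]
      rw [show pvDiffs ((x, y) :: rest) s = (s, x, y) :: pvDiffs rest (s + 1) by
            simp [pvDiffs, PySem.List.enumerate_cons, bne_iff_ne, h]]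
      simp

lemma pvFirstDiff_some (l : List (Int × Int)) (s k : Int) (rest : List (Int × Int)) (i : Int)
    (h : pvFirstDiff l s = some (k, rest, i)) :
    ∃ x y, pvDiffs l s = (k, (x, y)) :: pvDiffs rest i := by
  induction l generalizing s with
  | nil => simp [pvFirstDiff] at h
  | cons p tl ih =>
    obtain ⟨x, y⟩ := p
    simp only [pvFirstDiff] at h
    by_cases hxy : x = y
    · subst hxy
      rw [if_neg (by simp)] at h
      rw [show pvDiffs ((x, x) :: tl) s = pvDiffs tl (s + 1) by
            simp [pvDiffs, PySem.List.enumerate_cons]]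
      exact ih (s + 1) h
    · rw [if_pos hxy] at h
      obtain ⟨h1, h2, h3⟩ : k = s ∧ rest = tl ∧ i = s + 1 := by
        have := Option.some.inj h
        refine ⟨congrArg Prod.fst this |>.symm, ?_, ?_⟩
        · exact (congrArg (fun p => p.2.1) this).symm
        · exact (congrArg (fun p => p.2.2) this).symm
      subst h1; subst h2; subst h3
      refine ⟨x, y, ?_⟩
      simp [pvDiffs, PySem.List.enumerate_cons, bne_iff_ne, hxy]

lemma pvPairDec (q1 q2 : List Int) :
    (pvFlipIndexB q1 q2).1 = (pvScanA (q1.zip q2) 0 none).2 ∧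
    ((pvScanA (q1.zip q2) 0 none).2 = true →
      (pvFlipIndexB q1 q2).2 = (pvScanA (q1.zip q2) 0 none).1) := by
  rw [pvScanA_none]
  unfold pvFlipIndexB
  rcases hf : pvFirstDiff (q1.zip q2) 0 with _ | ⟨k, rest, i⟩
  · rw [(pvFirstDiff_none_iff _ _).mp hf]
    simp
  · obtain ⟨x, y, hD⟩ := pvFirstDiff_some _ _ _ _ _ hf
    rw [hD]
    have hmem : (k, x, y) ∈ pvDiffs (q1.zip q2) 0 := by rw [hD]; exact List.mem_cons_self ..
    obtain ⟨hx, hy⟩ := pvDiffs_mem q1 q2 k x y hmem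
    by_cases hc : x = 0 ∧ y = -1
    · by_cases hr : pvFirstDiff rest i = none
      · have hnil : pvDiffs rest i = [] := (pvFirstDiff_none_iff _ _).mp hr
        simp [hx, hy, hc.1, hc.2, hr, hnil]
      · have hne : pvDiffs rest i ≠ [] := fun hh => hr ((pvFirstDiff_none_iff _ _).mpr hh)
        simp [hx, hy, hc.1, hc.2, hr, hne]
    · have hnc : ¬ (PySem.List.pyGetD q1 k 0 = 0 ∧ PySem.List.pyGetD q2 k 0 = -1
          ∧ pvFirstDiff rest i = none) := by
        rw [hx, hy]
        rintro ⟨h1, h2, -⟩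
        exact hc ⟨h1, h2⟩
      simp [hnc, hc]

lemma pvEnumSkip {alpha : Type} (l : List alpha) (s j : Nat) :
    ((PySem.List.enumerate l (s : Int)).filter (fun p => p.1 != ((s + j : Nat) : Int))).map (fun p => p.2)
      = l.take j ++ l.drop (j + 1) := by
  induction l generalizing s j with
  | nil => simp [PySem.List.enumerate_nil]
  | cons x xs ih =>
    rw [PySem.List.enumerate_cons, List.filter_cons]
    rcases j with _ | j'
    · have hbeq : (((s : Int), x).1 != ((s + 0 : Nat) : Int)) = false := by simp
      rw [hbeq]
      have hall : (PySem.List.enumerate xs ((s : Int) + 1)).filter (fun p => p.1 != ((s + 0 : Nat) : Int))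
          = PySem.List.enumerate xs ((s : Int) + 1) := by
        apply List.filter_eq_self.mpr
        intro p hp
        rw [show ((s : Int) + 1) = ((s + 1 : Nat) : Int) by push_cast; ring] at hp
        rw [PySem.List.mem_enumerate_iff] at hp
        obtain ⟨m, hm, hp⟩ := hp
        subst hp
        simp only [bne_iff_ne, ne_eq]
        intro hcontra
        push_cast at hcontra
        omega
      simp only [Bool.false_eq_true, if_false]
      rw [hall, PySem.List.map_snd_enumerate]
      simp
    · have hbeq : (((s : Int), x).1 != ((s + (j' + 1) : Nat) : Int)) = true := by
        simp only [bne_iff_ne, ne_eq, decide_eq_true_eq]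
        push_cast; omega
      rw [hbeq, if_pos rfl]
      simp only [List.map_cons]
      rw [show ((s : Int) + 1) = ((s + 1 : Nat) : Int) by push_cast; ring]
      have hih := ih (s + 1) j'
      rw [show ((s + 1 + j' : Nat) : Int) = ((s + (j' + 1) : Nat) : Int) by push_cast; ring] at hih
      rw [hih]
      simp

def pvRemE (v : List Int) (l : List (List Int)) : List (List Int) :=
  if v ∈ l then l.erase v else l

def pvSurv (c : List Int → Nat) : List (List Int) → List (List Int)
  | [] => []
  | x :: xs => if c x = 0 then x :: pvSurv c xs else pvSurv (fun v => if v = x then c v - 1 else c v) xs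

lemma pvRemE_nil (v : List Int) : pvRemE v [] = [] := by simp [pvRemE]

lemma pvRemE_cons (v x : List Int) (t : List (List Int)) :
    pvRemE v (x :: t) = if x = v then t else x :: pvRemE v t := by
  unfold pvRemE
  by_cases hxv : x = v
  · subst hxv
    simp [List.erase_cons_head]
  · rw [if_neg hxv]
    by_cases hm : v ∈ t
    · rw [if_pos (by simp [hm]), if_pos hm, List.erase_cons_tail]
      simp [hxv]
    · rw [if_neg (by simp [hm, Ne.symm hxv]), if_neg hm]

lemma pvSurv_congr (c c' : List Int → Nat) (l : List (List Int)) (h : ∀ v, c v = c' v) :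
    pvSurv c l = pvSurv c' l := by
  have : c = c' := funext h
  rw [this]

lemma pvSurv_zero (l : List (List Int)) : pvSurv (fun _ => 0) l = l := by
  induction l with
  | nil => rfl
  | cons x xs ih => simp [pvSurv, ih]

lemma pvRemE_surv (v : List Int) (c : List Int → Nat) (l : List (List Int)) :
    pvRemE v (pvSurv c l) = pvSurv (fun w => if w = v then c w + 1 else c w) l := by
  induction l generalizing c with
  | nil => simp [pvSurv, pvRemE_nil]
  | cons x xs ih =>
    by_cases hcx : c x = 0
    · rw [show pvSurv c (x :: xs) = x :: pvSurv c xs by simp [pvSurv, hcx], pvRemE_cons]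
      by_cases hxv : x = v
      · subst hxv
        rw [if_pos rfl]
        rw [show pvSurv (fun w => if w = x then c w + 1 else c w) (x :: xs)
              = pvSurv (fun w => if w = x then (if w = x then c w + 1 else c w) - 1 else (if w = x then c w + 1 else c w)) xs
            by simp [pvSurv, hcx]]
        apply pvSurv_congr
        intro w
        by_cases hw : w = x <;> simp [hw]
      · rw [if_neg hxv, ih]
        have hx' : (if x = v then c x + 1 else c x) = 0 := by simp [hxv, hcx]
        rw [show pvSurv (fun w => if w = v then c w + 1 else c w) (x :: xs)
              = x :: pvSurv (fun w => if w = v then c w + 1 else c w) xs by simp [pvSurv, hx']]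
    · rw [show pvSurv c (x :: xs) = pvSurv (fun w => if w = x then c w - 1 else c w) xs
            by simp [pvSurv, hcx], ih]
      by_cases hxv : x = v
      · subst hxv
        have hx' : (if x = x then c x + 1 else c x) ≠ 0 := by simp
        rw [show pvSurv (fun w => if w = x then c w + 1 else c w) (x :: xs)
              = pvSurv (fun w => if w = x then (if w = x then c w + 1 else c w) - 1 else (if w = x then c w + 1 else c w)) xs
            by simp [pvSurv]]
        apply pvSurv_congr
        intro w
        by_cases hw : w = x <;> simp [hw] <;> omega
      · have hx' : (if x = v then c x + 1 else c x) ≠ 0 := by simp [hxv, hcx]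
        rw [show pvSurv (fun w => if w = v then c w + 1 else c w) (x :: xs)
              = pvSurv (fun w => if w = x then (if w = v then c w + 1 else c w) - 1 else (if w = v then c w + 1 else c w)) xs
            by simp [pvSurv, hx']]
        apply pvSurv_congr
        intro w
        by_cases hw1 : w = x <;> by_cases hw2 : w = v <;> simp_all <;> omega
lemma pvFoldRem (q1 : List Int) (M : List (List Int × Option Int)) (c : List Int → Nat) (l : List (List Int)) :
    M.foldl (fun n m => pvRemE m.1 (pvRemE q1 n)) (pvSurv c l)
      = pvSurv (fun v => c v + (if v = q1 then M.length else 0) + (M.map (fun m => m.1)).count v) l := by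
  induction M generalizing c with
  | nil =>
    simp only [List.foldl_nil, List.map_nil, List.length_nil]
    apply pvSurv_congr; intro v; simp
  | cons m M' ih =>
    simp only [List.foldl_cons]
    rw [pvRemE_surv, pvRemE_surv, ih]
    apply pvSurv_congr
    intro v
    simp only [List.map_cons, List.count_cons, List.length_cons]
    by_cases h1 : v = q1 <;> by_cases h2 : v = m.1 <;>
      simp_all [beq_iff_eq] <;> first | omega | (exact fun h => h2 h.symm) | (split_ifs <;> simp_all <;> omega)

lemma pvRemGet (v : List Int) (n : List (List Int)) :
    (if v ∈ n then (PySem.List.remove? n v).getD n else n) = pvRemE v n := by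
  unfold pvRemE
  by_cases h : v ∈ n
  · rw [if_pos h, if_pos h, PySem.List.remove?_eq_some_erase n v h]; rfl
  · rw [if_neg h, if_neg h]

lemma pvInnerA_split (q1 : List Int) (p0 : List (List Int × Option Int)) (n0 : List (List Int))
    (others : List (List Int)) :
    pvInnerA q1 (p0, n0) others =
      (others.foldl (fun acc q2 =>
          if (pvScanA (q1.zip q2) 0 none).2 then acc ++ [(q2, (pvScanA (q1.zip q2) 0 none).1)] else acc) p0,
       others.foldl (fun nn q2 =>
          if (pvScanA (q1.zip q2) 0 none).2 then pvRemE q2 (pvRemE q1 nn) else nn) n0) := by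
  have h1 : pvInnerA q1 (p0, n0) others =
      others.foldl (fun (st : List (List Int × Option Int) × List (List Int)) q2 =>
        ((fun (a : List (List Int × Option Int)) q2 =>
            if (pvScanA (q1.zip q2) 0 none).2 then a ++ [(q2, (pvScanA (q1.zip q2) 0 none).1)] else a) st.1 q2,
         (fun (n : List (List Int)) q2 =>
            if (pvScanA (q1.zip q2) 0 none).2 then pvRemE q2 (pvRemE q1 n) else n) st.2 q2)) (p0, n0) := by
    unfold pvInnerA
    apply PySem.List.foldl_congr_mem
    intro acc x hx
    obtain ⟨a, b⟩ := acc
    by_cases hs : (pvScanA (q1.zip x) 0 none).2 = true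
    · simp only [hs, if_true, pvRemGet]
    · simp only [Bool.not_eq_true] at hs
      simp [hs]
  rw [h1, PySem.List.foldl_prod_mk
        (f := fun (a : List (List Int × Option Int)) q2 =>
          if (pvScanA (q1.zip q2) 0 none).2 then a ++ [(q2, (pvScanA (q1.zip q2) 0 none).1)] else a)
        (g := fun (n : List (List Int)) q2 =>
          if (pvScanA (q1.zip q2) 0 none).2 then pvRemE q2 (pvRemE q1 n) else n)]

lemma pvPairsEq (solution : List (List Int)) (q1 : List Int) (k : Nat) (hk : k < solution.length) :
    ((PySem.List.enumerate solution 0).foldl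
        (fun acc jq =>
          if jq.1 = ((k : Nat) : Int) then acc
          else
            let f := pvFlipIndexB q1 jq.2
            if f.1 then acc ++ [(jq.2, f.2)] else acc)
        [])
      = ((solution.take k ++ solution.drop (k + 1)).foldl
          (fun acc q2 =>
            if (pvScanA (q1.zip q2) 0 none).2 then acc ++ [(q2, (pvScanA (q1.zip q2) 0 none).1)] else acc)
          []) := by
  have h1 : ((PySem.List.enumerate solution 0).foldl
        (fun acc jq =>
          if jq.1 = ((k : Nat) : Int) then acc
          else
            let f := pvFlipIndexB q1 jq.2
            if f.1 then acc ++ [(jq.2, f.2)] else acc)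
        [])
      = (PySem.List.enumerate solution 0).foldl
          (fun acc jq =>
            if ((jq.1 != ((k : Nat) : Int)) && (pvFlipIndexB q1 jq.2).1) then acc ++ [(jq.2, (pvFlipIndexB q1 jq.2).2)] else acc)
          [] := by
    apply PySem.List.foldl_congr_mem
    intro acc x hx
    by_cases hxk : x.1 = ((k : Nat) : Int)
    · simp [hxk]
    · simp [hxk]
  rw [h1, PySem.List.foldl_append_if, PySem.List.foldl_append_if, List.nil_append, List.nil_append]
  have h2 : (PySem.List.enumerate solution 0).filter
        (fun jq => (jq.1 != ((k : Nat) : Int)) && (pvFlipIndexB q1 jq.2).1)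
      = ((PySem.List.enumerate solution 0).filter (fun jq => jq.1 != ((k : Nat) : Int))).filter
          (fun jq => (pvFlipIndexB q1 jq.2).1) := by
    rw [List.filter_filter]
    apply List.filter_congr
    intro a _
    rw [Bool.and_comm]
  rw [h2]
  have h3 : (((PySem.List.enumerate solution 0).filter (fun jq => jq.1 != ((k : Nat) : Int))).filter
          (fun jq => (pvFlipIndexB q1 jq.2).1)).map (fun jq => (jq.2, (pvFlipIndexB q1 jq.2).2))
      = ((((PySem.List.enumerate solution 0).filter (fun jq => jq.1 != ((k : Nat) : Int))).map (fun jq => jq.2)).filter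
          (fun q2 => (pvFlipIndexB q1 q2).1)).map (fun q2 => (q2, (pvFlipIndexB q1 q2).2)) := by
    rw [List.filter_map, List.map_map]
    rfl
  rw [h3]
  have h4 : (((PySem.List.enumerate solution 0).filter (fun jq => jq.1 != ((k : Nat) : Int))).map (fun jq => jq.2))
      = solution.take k ++ solution.drop (k + 1) := by
    have := pvEnumSkip solution 0 k
    simpa using this
  rw [h4]
  have h5 : (solution.take k ++ solution.drop (k + 1)).filter (fun q2 => (pvFlipIndexB q1 q2).1)
      = (solution.take k ++ solution.drop (k + 1)).filter (fun q2 => (pvScanA (q1.zip q2) 0 none).2) := by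
    apply List.filter_congr
    intro x hx
    rw [(pvPairDec q1 x).1]
  rw [h5]
  apply List.map_congr_left
  intro x hx
  have hmem : (pvScanA (q1.zip x) 0 none).2 = true := by
    simpa using (List.mem_filter.mp hx).2
  rw [(pvPairDec q1 x).2 hmem]

lemma pvPhase2 (ev : PySem.Dict (List Int) Int) (l : List (List Int)) :
    ∀ (seen : PySem.Dict (List Int) Int) (acc : List (List Int)),
      (l.foldl (fun (st : PySem.Dict (List Int) Int × List (List Int)) q =>
          let s' := st.1.modify q 0 (· + 1)
          (s', if s'.getD q 0 > ev.getD q 0 then st.2 ++ [q] else st.2))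
        (seen, acc)).2
      = acc ++ pvSurv (fun v => (ev.getD v 0 - seen.getD v 0).toNat) l := by
  induction l with
  | nil => intro seen acc; simp [pvSurv]
  | cons q xs ih =>
    intro seen acc
    simp only [List.foldl_cons]
    rw [ih]
    by_cases hc : ev.getD q 0 - seen.getD q 0 ≤ 0
    · have hcond : ((seen.modify q 0 (· + 1)).getD q 0 > ev.getD q 0) := by
        rw [PySem.Dict.getD_modify_self]; omega
      rw [if_pos hcond]
      have hsurv : pvSurv (fun v => (ev.getD v 0 - seen.getD v 0).toNat) (q :: xs)
          = q :: pvSurv (fun v => (ev.getD v 0 - seen.getD v 0).toNat) xs := by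
        simp only [pvSurv]
        rw [if_pos (by omega)]
      rw [hsurv]
      rw [pvSurv_congr (fun v => (ev.getD v 0 - (seen.modify q 0 (· + 1)).getD v 0).toNat)
            (fun v => (ev.getD v 0 - seen.getD v 0).toNat) xs ?_]
      · simp
      · intro v
        by_cases hv : v = q
        · subst hv; simp [PySem.Dict.getD_modify_self] <;> omega
        · simp [PySem.Dict.getD_modify, hv]
    · have hcond : ¬ ((seen.modify q 0 (· + 1)).getD q 0 > ev.getD q 0) := by
        rw [PySem.Dict.getD_modify_self]; omega
      rw [if_neg hcond]
      have hsurv : pvSurv (fun v => (ev.getD v 0 - seen.getD v 0).toNat) (q :: xs)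
          = pvSurv (fun v => if v = q then (ev.getD v 0 - seen.getD v 0).toNat - 1 else (ev.getD v 0 - seen.getD v 0).toNat) xs := by
        simp only [pvSurv]
        rw [if_neg (by omega)]
      rw [hsurv]
      apply congrArg
      apply pvSurv_congr
      intro v
      by_cases hv : v = q
      · subst hv; simp [PySem.Dict.getD_modify_self] <;> omega
      · simp [PySem.Dict.getD_modify, hv]

lemma pvFoldN (q1 : List Int) (O : List (List Int)) (n0 : List (List Int)) :
    O.foldl (fun nn q2 =>
        if (pvScanA (q1.zip q2) 0 none).2 then pvRemE q2 (pvRemE q1 nn) else nn) n0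
      = ((O.filter (fun q2 => (pvScanA (q1.zip q2) 0 none).2)).map
            (fun q2 => (q2, (pvScanA (q1.zip q2) 0 none).1))).foldl
          (fun n m => pvRemE m.1 (pvRemE q1 n)) n0 := by
  induction O generalizing n0 with
  | nil => rfl
  | cons x xs ih =>
    simp only [List.foldl_cons, List.filter_cons]
    by_cases hx : (pvScanA (q1.zip x) 0 none).2 = true
    · rw [if_pos hx, hx]
      simp only [List.map_cons, List.foldl_cons]
      exact ih _
    · simp only [Bool.not_eq_true] at hx
      rw [hx]
      simp only [Bool.false_eq_true, if_false]
      exact ih _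

lemma pvCountFold (q1 : List Int) (P : List (List Int × Option Int)) (ev : PySem.Dict (List Int) Int) (v : List Int) :
    ((P.foldl (fun d m => d.modify m.1 0 (· + 1)) (ev.modify q1 0 (· + (P.length : Int)))).getD v 0)
      = ev.getD v 0 + (if v = q1 then (P.length : Int) else 0) + ((P.map (fun m => m.1)).count v : Int) := by
  have hmap : P.foldl (fun d m => d.modify m.1 0 (· + 1)) (ev.modify q1 0 (· + (P.length : Int)))
      = (P.map (fun m => m.1)).foldl (fun d x => d.modify x 0 (· + 1)) (ev.modify q1 0 (· + (P.length : Int))) := by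
    rw [List.foldl_map]
  rw [hmap, PySem.Dict.getD_foldl_modify_add_one, PySem.Dict.getD_modify]
  by_cases hv : v = q1 <;> simp [hv]

lemma pvOuter (solution : List (List Int)) (L : List (Int × List Int))
    (hL : ∀ p ∈ L, ∃ k : Nat, k < solution.length ∧ p.1 = (k : Int))
    (nn : List (List Int)) (neq : List (List Int × List (List Int × Option Int)))
    (ev : PySem.Dict (List Int) Int)
    (hnn : nn = pvSurv (fun v => ((ev.getD v 0).toNat)) solution)
    (hpos : ∀ v, 0 ≤ ev.getD v 0) :
    (L.foldl
        (fun (st : List (List Int) × List (List Int × List (List Int × Option Int))) iq =>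
          let i := iq.1
          let q1 := iq.2
          if (PySem.List.slice q1 none (some (-1))).any (fun c => c == -1)
               ∨ PySem.List.pyGetD q1 (-1) 0 = 0 then st
          else
            let others := PySem.List.slice solution none (some i) ++ PySem.List.slice solution (some (i + 1)) none
            let p := pvInnerA q1 ([], st.1) others
            (p.2, if p.1 ≠ [] then st.2 ++ [(q1, p.1)] else st.2))
        (nn, neq)).1
      = pvSurv (fun v => (((L.foldl
          (fun (st : List (List Int × List (List Int × Option Int)) × PySem.Dict (List Int) Int) iq =>
            let i := iq.1
            let q1 := iq.2
            if PySem.List.pyGetD q1 (-1) 0 = 0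
                 ∨ (PySem.List.slice q1 none (some (-1))).any (fun c => c == -1) then st
            else
              let mts :=
                (PySem.List.enumerate solution 0).foldl
                  (fun acc jq =>
                    if jq.1 = i then acc
                    else
                      let f := pvFlipIndexB q1 jq.2
                      if f.1 then acc ++ [(jq.2, f.2)] else acc)
                  []
              if mts = [] then st
              else
                let ev1 := st.2.modify q1 0 (· + (mts.length : Int))
                let ev2 := mts.foldl (fun d m => d.modify m.1 0 (· + 1)) ev1
                (st.1 ++ [(q1, mts)], ev2))
          (neq, ev)).2).getD v 0).toNat) solution
    ∧ (L.foldl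
        (fun (st : List (List Int) × List (List Int × List (List Int × Option Int))) iq =>
          let i := iq.1
          let q1 := iq.2
          if (PySem.List.slice q1 none (some (-1))).any (fun c => c == -1)
               ∨ PySem.List.pyGetD q1 (-1) 0 = 0 then st
          else
            let others := PySem.List.slice solution none (some i) ++ PySem.List.slice solution (some (i + 1)) none
            let p := pvInnerA q1 ([], st.1) others
            (p.2, if p.1 ≠ [] then st.2 ++ [(q1, p.1)] else st.2))
        (nn, neq)).2
      = (L.foldl
          (fun (st : List (List Int × List (List Int × Option Int)) × PySem.Dict (List Int) Int) iq =>
            let i := iq.1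
            let q1 := iq.2
            if PySem.List.pyGetD q1 (-1) 0 = 0
                 ∨ (PySem.List.slice q1 none (some (-1))).any (fun c => c == -1) then st
            else
              let mts :=
                (PySem.List.enumerate solution 0).foldl
                  (fun acc jq =>
                    if jq.1 = i then acc
                    else
                      let f := pvFlipIndexB q1 jq.2
                      if f.1 then acc ++ [(jq.2, f.2)] else acc)
                  []
              if mts = [] then st
              else
                let ev1 := st.2.modify q1 0 (· + (mts.length : Int))
                let ev2 := mts.foldl (fun d m => d.modify m.1 0 (· + 1)) ev1
                (st.1 ++ [(q1, mts)], ev2))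
          (neq, ev)).1
    ∧ (∀ v, 0 ≤ ((L.foldl
          (fun (st : List (List Int × List (List Int × Option Int)) × PySem.Dict (List Int) Int) iq =>
            let i := iq.1
            let q1 := iq.2
            if PySem.List.pyGetD q1 (-1) 0 = 0
                 ∨ (PySem.List.slice q1 none (some (-1))).any (fun c => c == -1) then st
            else
              let mts :=
                (PySem.List.enumerate solution 0).foldl
                  (fun acc jq =>
                    if jq.1 = i then acc
                    else
                      let f := pvFlipIndexB q1 jq.2
                      if f.1 then acc ++ [(jq.2, f.2)] else acc)
                  []
              if mts = [] then st
              else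
                let ev1 := st.2.modify q1 0 (· + (mts.length : Int))
                let ev2 := mts.foldl (fun d m => d.modify m.1 0 (· + 1)) ev1
                (st.1 ++ [(q1, mts)], ev2))
          (neq, ev)).2).getD v 0) := by
  
  induction L generalizing nn neq ev with
  | nil => exact ⟨hnn, rfl, hpos⟩
  | cons iq L' ih =>
    obtain ⟨k, hk, hi⟩ := hL iq (List.mem_cons_self ..)
    have hL' : ∀ p ∈ L', ∃ k : Nat, k < solution.length ∧ p.1 = (k : Int) := by
      intro p hp; exact hL p (List.mem_cons_of_mem _ hp)
    simp only [List.foldl_cons]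
    by_cases hCA : ((PySem.List.slice iq.2 none (some (-1))).any (fun c => c == -1) : Prop)
        ∨ PySem.List.pyGetD iq.2 (-1) 0 = 0
    · rw [if_pos hCA, if_pos (Or.symm hCA)]
      exact ih hL' nn neq ev hnn hpos
    · rw [if_neg hCA, if_neg (fun h => hCA (Or.symm h))]
      have hoth : PySem.List.slice solution none (some iq.1) ++ PySem.List.slice solution (some (iq.1 + 1)) none
          = solution.take k ++ solution.drop (k + 1) := by
        rw [hi, PySem.List.slice_to_natCast,
            show ((k : Int) + 1) = ((k + 1 : Nat) : Int) by push_cast; ring,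
            PySem.List.slice_from_natCast]
      rw [hoth, pvInnerA_split]
      have hmts :
          ((PySem.List.enumerate solution 0).foldl
            (fun acc jq =>
              if jq.1 = iq.1 then acc
              else
                let f := pvFlipIndexB iq.2 jq.2
                if f.1 then acc ++ [(jq.2, f.2)] else acc) [])
          = ((solution.take k ++ solution.drop (k + 1)).foldl
              (fun acc q2 =>
                if (pvScanA (iq.2.zip q2) 0 none).2 then acc ++ [(q2, (pvScanA (iq.2.zip q2) 0 none).1)] else acc)
              []) := by
        rw [hi]
        exact pvPairsEq solution iq.2 k hk
      set P := ((solution.take k ++ solution.drop (k + 1)).foldl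
              (fun acc q2 =>
                if (pvScanA (iq.2.zip q2) 0 none).2 then acc ++ [(q2, (pvScanA (iq.2.zip q2) 0 none).1)] else acc)
              []) with hPdef
      have hPform : P = ((solution.take k ++ solution.drop (k + 1)).filter
            (fun q2 => (pvScanA (iq.2.zip q2) 0 none).2)).map
              (fun q2 => (q2, (pvScanA (iq.2.zip q2) 0 none).1)) := by
        rw [hPdef, PySem.List.foldl_append_if, List.nil_append]
      have hnn' : (solution.take k ++ solution.drop (k + 1)).foldl
            (fun nn q2 =>
              if (pvScanA (iq.2.zip q2) 0 none).2 then pvRemE q2 (pvRemE iq.2 nn) else nn) nn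
          = pvSurv (fun v => ((ev.getD v 0).toNat + (if v = iq.2 then P.length else 0)
              + (P.map (fun m => m.1)).count v)) solution := by
        rw [pvFoldN, ← hPform, hnn, pvFoldRem]
      by_cases hM : P = []
      · have hnn2 : (solution.take k ++ solution.drop (k + 1)).foldl
              (fun nn q2 =>
                if (pvScanA (iq.2.zip q2) 0 none).2 then pvRemE q2 (pvRemE iq.2 nn) else nn) nn = nn := by
          rw [hnn', hnn]
          apply pvSurv_congr
          intro v
          simp [hM]
        rw [hmts, if_pos hM, hnn2]
        have hA : (if P ≠ [] then neq ++ [(iq.2, P)] else neq) = neq := by simp [hM]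
        rw [hA]
        exact ih hL' nn neq ev hnn hpos
      · rw [hmts, if_neg hM, if_pos hM, hnn']
        refine ih hL' _ _ _ ?_ ?_
        · apply pvSurv_congr
          intro v
          rw [pvCountFold]
          by_cases hv : v = iq.2
          · subst hv
            have hp := hpos iq.2
            simp only [eq_self_iff_true, if_true]
            omega
          · have hp := hpos v
            simp only [if_neg hv]
            omega
        · intro v
          rw [pvCountFold]
          by_cases hv : v = iq.2
          · subst hv
            have hp := hpos iq.2
            simp only [eq_self_iff_true, if_true]
            omega
          · have hp := hpos v
            simp only [if_neg hv]
            omega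

-- ===== VERDICT (by name: the statement is the Claim_ definition above) =====
theorem isolate_neq_queries_spec : Claim_equal_isolate_neq_queries := by
  intro solution _hdom _hpre
  unfold Spec_isolate_neq_queries isolate_neq_queries isolate_neq_queries_alt
  have hL : ∀ p ∈ PySem.List.enumerate solution 0, ∃ k : Nat, k < solution.length ∧ p.1 = (k : Int) := by
    intro p hp
    rw [PySem.List.mem_enumerate_iff] at hp
    obtain ⟨k, hk, hp⟩ := hp
    exact ⟨k, hk, by rw [hp]; simp⟩
  have h0 : solution = pvSurv (fun v => (((PySem.Dict.empty : PySem.Dict (List Int) Int).getD v 0)).toNat) solution := by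
    rw [pvSurv_congr _ (fun _ => 0) _ (fun v => by simp), pvSurv_zero]
  have hpos0 : ∀ v : List Int, 0 ≤ (PySem.Dict.empty : PySem.Dict (List Int) Int).getD v 0 := fun v => by simp
  obtain ⟨h1, h2, _h3⟩ := pvOuter solution (PySem.List.enumerate solution 0) hL solution [] PySem.Dict.empty h0 hpos0
  simp only [Prod.ext_iff]
  constructor
  · rw [h1]
    simp only [pvPhase2, List.nil_append]
    apply pvSurv_congr
    intro v
    simp
  · exact h2
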